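-- pv_equiv track=rewrite | github.com/61070259/PSIT-2018 | app.py | all_victim
-- ===== SOURCE A (Python) =====
-- def all_victim(data_set, count, case):
--     """
--     Count all deaths and injured from 1st January 2013 to
--     31th December 2017 and add them to dictionary.
--     """
--     for case_data in range(1, len(case)):
--         date = case[case_data][1]
--         death = int(case[case_data][5])
--         injured = int(case[case_data][6])
--         if date[:4] == "2013":
--             count[0] += death+injured
--             data_set["2013"] = count[0]
--         elif date[:4] == "2014":
--             count[1] += death+injured
--             data_set["2014"] = count[1]
--         elif date[:4] == "2015":
--             count[2] += death+injured
--             data_set["2015"] = count[2]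
--         elif date[:4] == "2016":
--             count[3] += death+injured
--             data_set["2016"] = count[3]
--         elif date[:4] == "2017":
--             count[4] += death+injured
--             data_set["2017"] = count[4]
--     return data_set
--     return sum(count)
-- ===== SOURCE B (Python) =====
-- def all_victim(data_set, count, case):
--     """
--     Count all deaths and injured from 1st January 2013 to
--     31th December 2017 and add them to dictionary.
--     """
--     YEARS = ("2013", "2014", "2015", "2016", "2017")
--     totals = {}
--     for row in case[1:]:
--         year = row[1][:4]
--         subtotal = int(row[5]) + int(row[6])
--         if year in YEARS:
--             totals[year] = totals.get(year, 0) + subtotal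
--     for year, subtotal in totals.items():
--         idx = int(year) - 2013
--         count[idx] += subtotal
--         data_set[year] = count[idx]
--     return data_set
-- ===== Notes on version B (the rewrite author's own statement) =====
-- stated objective: alternative
-- what changed: B replaces A's single branch-per-row loop (five explicit if/elif arms each updating count and the dict per row) by two passes: a group-by pass building a year->subtotal dict in first-occurrence order, then a pass over that dict doing one count[int(year)-2013] update and one data_set write per distinct year.
import Mathlib
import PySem

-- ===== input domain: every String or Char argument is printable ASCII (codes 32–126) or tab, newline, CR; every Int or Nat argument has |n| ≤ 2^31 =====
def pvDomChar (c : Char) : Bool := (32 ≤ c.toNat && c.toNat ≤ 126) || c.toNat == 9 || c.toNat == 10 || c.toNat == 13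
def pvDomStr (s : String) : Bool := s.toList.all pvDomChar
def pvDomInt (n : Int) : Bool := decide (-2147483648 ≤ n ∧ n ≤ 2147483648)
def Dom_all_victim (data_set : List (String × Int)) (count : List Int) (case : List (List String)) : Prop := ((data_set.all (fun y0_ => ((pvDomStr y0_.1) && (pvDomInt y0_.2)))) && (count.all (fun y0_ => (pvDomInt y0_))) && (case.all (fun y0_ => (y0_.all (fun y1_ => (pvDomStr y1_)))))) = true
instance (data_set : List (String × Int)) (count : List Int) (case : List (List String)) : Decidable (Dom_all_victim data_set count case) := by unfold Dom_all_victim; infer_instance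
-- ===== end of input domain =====

-- B replaces A's per-row five-way if/elif loop by two passes (group subtotals per year, then one
-- count update and dict write per distinct year); equivalence is about the RETURN value (both
-- mutate data_set/count in place in Python, with the same final contents).

-- ===== PORT A =====
-- loop body of A, extracted as a helper (row = case[case_data]); literal transliteration of the if/elif chain
def pvBodyA (s : PySem.Dict String Int × List Int) (row : List String) :
    PySem.Dict String Int × List Int :=
  let date := PySem.List.pyGetD row 1 ""
  let death := (PySem.Int.ofStr? (PySem.List.pyGetD row 5 "")).getD 0
  let injured := (PySem.Int.ofStr? (PySem.List.pyGetD row 6 "")).getD 0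
  if PySem.Str.slice date none (some 4) == "2013" then
    let v := PySem.List.pyGetD s.2 0 0 + (death + injured)
    (s.1.insert "2013" v, s.2.set 0 v)
  else if PySem.Str.slice date none (some 4) == "2014" then
    let v := PySem.List.pyGetD s.2 1 0 + (death + injured)
    (s.1.insert "2014" v, s.2.set 1 v)
  else if PySem.Str.slice date none (some 4) == "2015" then
    let v := PySem.List.pyGetD s.2 2 0 + (death + injured)
    (s.1.insert "2015" v, s.2.set 2 v)
  else if PySem.Str.slice date none (some 4) == "2016" then
    let v := PySem.List.pyGetD s.2 3 0 + (death + injured)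
    (s.1.insert "2016" v, s.2.set 3 v)
  else if PySem.Str.slice date none (some 4) == "2017" then
    let v := PySem.List.pyGetD s.2 4 0 + (death + injured)
    (s.1.insert "2017" v, s.2.set 4 v)
  else s

def all_victim (data_set : List (String × Int)) (count : List Int) (case : List (List String)) : List (String × Int) :=
  ((PySem.List.pyRange 1 (PySem.List.len case) 1).foldl
    (fun s i => pvBodyA s (PySem.List.pyGetD case i []))
    (PySem.Dict.mk data_set, count)).1.items

-- ===== PORT B =====
-- first pass of B: accumulate the per-year subtotal into the totals dict
def pvBodyT (t : PySem.Dict String Int) (row : List String) : PySem.Dict String Int :=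
  let year := PySem.Str.slice (PySem.List.pyGetD row 1 "") none (some 4)
  let subtotal := (PySem.Int.ofStr? (PySem.List.pyGetD row 5 "")).getD 0 +
                  (PySem.Int.ofStr? (PySem.List.pyGetD row 6 "")).getD 0
  if year == "2013" || year == "2014" || year == "2015" || year == "2016" || year == "2017" then
    t.insert year (t.getD year 0 + subtotal)
  else t

-- second pass of B: one count update and one dict write per (year, subtotal) item
-- (idx = int(year) - 2013 is ≥ 0 for every key of totals — a year literal — so .toNat is exact here)
def pvBodyP (s : PySem.Dict String Int × List Int) (p : String × Int) :
    PySem.Dict String Int × List Int :=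
  let idx := (PySem.Int.ofStr? p.1).getD 0 - 2013
  let v := PySem.List.pyGetD s.2 idx 0 + p.2
  (s.1.insert p.1 v, s.2.set idx.toNat v)

def all_victim_alt (data_set : List (String × Int)) (count : List Int) (case : List (List String)) : List (String × Int) :=
  let totals := (PySem.List.slice case (some 1) none).foldl pvBodyT PySem.Dict.empty
  (totals.items.foldl pvBodyP (PySem.Dict.mk data_set, count)).1.items

-- ===== PRECONDITION & SPEC =====
-- which count slot (if any) a 4-char year prefix selects
def yearSlot (y : String) : Option Nat :=
  if y = "2013" then some 0
  else if y = "2014" then some 1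
  else if y = "2015" then some 2
  else if y = "2016" then some 3
  else if y = "2017" then some 4
  else none

-- Pre_: exactly where Python A returns normally — every data row has the indexed fields
-- (length ≥ 7), its death/injured fields parse as ints, and when its year matches 2013–2017
-- the corresponding count slot exists.
def Pre_all_victim (data_set : List (String × Int)) (count : List Int) (case : List (List String)) : Prop :=
  ∀ row ∈ case.drop 1,
    7 ≤ row.length ∧
    (PySem.Int.ofStr? (PySem.List.pyGetD row 5 "")).isSome = true ∧
    (PySem.Int.ofStr? (PySem.List.pyGetD row 6 "")).isSome = true ∧
    ((yearSlot (PySem.Str.slice (PySem.List.pyGetD row 1 "") none (some 4))).all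
      (fun i => decide (i < count.length))) = true

instance (data_set : List (String × Int)) (count : List Int) (case : List (List String)) : Decidable (Pre_all_victim data_set count case) := by unfold Pre_all_victim; infer_instance

def pvWitness_all_victim : (List (String × Int)) × List Int × List (List String) :=
  ([("2013", 1)], [0, 0, 0, 0, 0], [["header"], ["x", "2014-01-01", "a", "b", "c", "2", "3"]])

def Spec_all_victim (data_set : List (String × Int)) (count : List Int) (case : List (List String)) (out : List (String × Int)) : Prop := out = all_victim_alt data_set count case
instance (data_set : List (String × Int)) (count : List Int) (case : List (List String)) (out : List (String × Int)) : Decidable (Spec_all_victim data_set count case out) := by unfold Spec_all_victim; infer_instance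

-- ===== CLAIM (what is proved, stated in full; the proofs are below) =====
def Claim_equal_all_victim : Prop := ∀ (data_set : List (String × Int)) (count : List Int) (case : List (List String)), Dom_all_victim data_set count case → Pre_all_victim data_set count case → Spec_all_victim data_set count case (all_victim data_set count case)

-- ===== LEMMAS AND PROOFS =====

-- year prefix of a row
def pvYkey (row : List String) : String :=
  PySem.Str.slice (PySem.List.pyGetD row 1 "") none (some 4)

-- death + injured of a row
def pvRval (row : List String) : Int :=
  (PySem.Int.ofStr? (PySem.List.pyGetD row 5 "")).getD 0 +
  (PySem.Int.ofStr? (PySem.List.pyGetD row 6 "")).getD 0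

-- A's step, rephrased through yearSlot
def pvStepA (s : PySem.Dict String Int × List Int) (row : List String) :
    PySem.Dict String Int × List Int :=
  match yearSlot (pvYkey row) with
  | some i =>
      let v := PySem.List.pyGetD s.2 (i : Int) 0 + pvRval row
      (s.1.insert (pvYkey row) v, s.2.set i v)
  | none => s

-- B's grouping step, rephrased through yearSlot
def pvStepT (t : PySem.Dict String Int) (row : List String) : PySem.Dict String Int :=
  match yearSlot (pvYkey row) with
  | some _ => t.insert (pvYkey row) (t.getD (pvYkey row) 0 + pvRval row)
  | none => t

lemma pvBodyA_eq (s : PySem.Dict String Int × List Int) (row : List String) :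
    pvBodyA s row = pvStepA s row := by
  simp only [pvBodyA, pvStepA, pvYkey, pvRval, yearSlot, beq_iff_eq]
  split_ifs with h1 h2 h3 h4 h5
  · simp only [h1]; rfl
  · simp only [h2]; rfl
  · simp only [h3]; rfl
  · simp only [h4]; rfl
  · simp only [h5]; rfl
  · rfl

lemma pvBodyT_eq (t : PySem.Dict String Int) (row : List String) :
    pvBodyT t row = pvStepT t row := by
  simp only [pvBodyT, pvStepT, pvYkey, pvRval, yearSlot, beq_iff_eq, Bool.or_eq_true,
    decide_eq_true_eq]
  split_ifs <;> simp_all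

lemma pvIdx_of_yearSlot {y : String} {i : Nat} (h : yearSlot y = some i) :
    (PySem.Int.ofStr? y).getD 0 - 2013 = (i : Int) := by
  unfold yearSlot at h
  split_ifs at h with h1 h2 h3 h4 h5 <;> simp_all <;> subst_vars <;> decide

lemma pvYearSlot_inj {a b : String} {ia ib : Nat} (ha : yearSlot a = some ia)
    (hb : yearSlot b = some ib) (hne : a ≠ b) : ia ≠ ib := by
  unfold yearSlot at ha hb
  split_ifs at ha hb <;> simp_all <;> omega

lemma pvInsert_comm (d : PySem.Dict String Int) (y k : String) (v w : Int)
    (hy : d.contains y = true) (hne : k ≠ y) :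
    (d.insert k w).insert y v = (d.insert y v).insert k w := by
  have hky : (k == y) = false := by simpa using hne
  have hyk : (y == k) = false := by simpa using (Ne.symm hne)
  by_cases hk : d.contains k = true
  · apply PySem.Dict.ext
    rw [PySem.Dict.items_insert_of_contains _ _ (by simp [PySem.Dict.contains_insert, hy]),
        PySem.Dict.items_insert_of_contains _ _ hk,
        PySem.Dict.items_insert_of_contains _ _ (by simp [PySem.Dict.contains_insert, hk]),
        PySem.Dict.items_insert_of_contains _ _ hy]
    rw [List.map_map, List.map_map]
    apply List.map_congr_left
    intro p _
    by_cases hpk : (p.1 == k) = true <;> by_cases hpy : (p.1 == y) = true <;>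
      simp_all [Function.comp]
  · have hk' : d.contains k = false := by simpa using hk
    apply PySem.Dict.ext
    rw [PySem.Dict.items_insert_of_contains _ _ (by simp [PySem.Dict.contains_insert, hy]),
        PySem.Dict.items_insert_of_not_contains _ _ hk',
        PySem.Dict.items_insert_of_not_contains _ _
          (by simp [PySem.Dict.contains_insert, hk', hky]),
        PySem.Dict.items_insert_of_contains _ _ hy]
    simp only [List.map_append, List.map_cons, List.map_nil, List.append_cancel_left_eq,
      List.cons.injEq, hky, Bool.false_eq_true, if_false]


lemma pvGetD_set_ne (xs : List Int) (i j : Nat) (h : i ≠ j) (w d : Int) :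
    PySem.List.pyGetD (xs.set j w) (i : Int) d = PySem.List.pyGetD xs (i : Int) d := by
  rw [PySem.List.pyGetD_natCast, PySem.List.pyGetD_natCast,
      List.getD_eq_getElem?_getD, List.getD_eq_getElem?_getD, List.getElem?_set_ne (Ne.symm h)]

lemma pvGetD_set_self (xs : List Int) (i : Nat) (h : i < xs.length) (w d : Int) :
    PySem.List.pyGetD (xs.set i w) (i : Int) d = w := by
  rw [PySem.List.pyGetD_natCast, List.getD_eq_getElem?_getD, List.getElem?_set_self h]; rfl

-- swapping A's step (year y, slot i) with one pass-2 item of a different year key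
lemma pvSwap {y : String} {i : Nat} (hyi : yearSlot y = some i) (r : List String)
    (hr : pvYkey r = y) (k : String) (u : Int) {j : Nat} (hj : yearSlot k = some j)
    (hk : k ≠ y) (s : PySem.Dict String Int × List Int) (hcy : s.1.contains y = true) :
    pvStepA (pvBodyP s (k, u)) r = pvBodyP (pvStepA s r) (k, u) := by
  have hij : i ≠ j := pvYearSlot_inj hyi hj (Ne.symm hk)
  simp only [pvStepA, pvBodyP, hr, hyi, pvIdx_of_yearSlot hj, Int.toNat_natCast]
  rw [pvGetD_set_ne _ _ _ hij, pvGetD_set_ne _ _ _ (Ne.symm hij)]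
  refine Prod.ext ?_ ?_
  · exact pvInsert_comm s.1 y k _ _ hcy hk
  · exact List.set_comm _ _ (Ne.symm hij)

-- commuting A's step (for a row with year y, slot i) past second-pass items with other year keys
lemma pvComm {y : String} {i : Nat} (hyi : yearSlot y = some i) (r : List String)
    (hr : pvYkey r = y) :
    ∀ (t : List (String × Int)) (s : PySem.Dict String Int × List Int),
      s.1.contains y = true →
      (∀ kv ∈ t, kv.1 ≠ y ∧ (yearSlot kv.1).isSome = true) →
      pvStepA (t.foldl pvBodyP s) r = t.foldl pvBodyP (pvStepA s r) := by
  intro t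
  induction t with
  | nil => intro s _ _; rfl
  | cons p t' ih =>
    intro s hcy hall
    obtain ⟨hpne, hpys⟩ := hall p (List.mem_cons_self)
    obtain ⟨j, hj⟩ := Option.isSome_iff_exists.mp hpys
    simp only [List.foldl_cons]
    rw [ih (pvBodyP s p)
        (by simp [pvBodyP, PySem.Dict.contains_insert, hcy])
        (fun kv hkv => hall kv (List.mem_cons_of_mem _ hkv))]
    rw [show p = (p.1, p.2) from rfl, pvSwap hyi r hr p.1 p.2 hj hpne s hcy]

-- inserting (y, getD y + v) into a dict already containing y, then running pass 2,
-- equals running pass 2 and then applying A's step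
lemma pvK2 {y : String} {i : Nat} (hyi : yearSlot y = some i) (r : List String)
    (hr : pvYkey r = y) :
    ∀ (t : List (String × Int)) (s : PySem.Dict String Int × List Int),
      (t.map Prod.fst).Nodup →
      (∀ kv ∈ t, (yearSlot kv.1).isSome = true) →
      i < s.2.length →
      y ∈ t.map Prod.fst →
      ((PySem.Dict.mk t).insert y ((PySem.Dict.mk t).getD y 0 + pvRval r)).items.foldl pvBodyP s
        = pvStepA (t.foldl pvBodyP s) r := by
  intro t
  induction t with
  | nil => intro s _ _ _ hmem; simp at hmem
  | cons p t' ih =>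
    obtain ⟨k, u⟩ := p
    intro s hnd hys hi hmem
    have hcont : (PySem.Dict.mk ((k, u) :: t')).contains y = true := by
      rw [PySem.Dict.contains_iff_mem_keys]; simpa [PySem.Dict.keys] using hmem
    rw [PySem.Dict.items_insert_of_contains _ _ hcont]
    by_cases hk : k = y
    · subst hk
      have hnd2 : (k :: t'.map Prod.fst).Nodup := by simpa using hnd
      have hynot : ∀ q ∈ t', q.1 ≠ k := by
        intro q hq
        intro hqk; exact (List.nodup_cons.mp hnd2).1 (hqk ▸ List.mem_map_of_mem hq)
      have hmap : ∀ w : Int, t'.map (fun p => if (p.1 == k) = true then (k, w) else p) = t' := by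
        intro w
        rw [List.map_congr_left (g := id) ?_, List.map_id]
        intro q hq; simp [hynot q hq]
      have hgd : (PySem.Dict.mk ((k, u) :: t')).getD k 0 = u := by
        simp [PySem.Dict.getD, PySem.Dict.get?_mk_cons]
      simp only [List.map_cons, BEq.rfl, if_true, hgd, hmap, List.foldl_cons]
      rw [pvComm hyi r hr t' (pvBodyP s (k, u))
          (by simp [pvBodyP, PySem.Dict.contains_insert_self])
          (fun kv hkv => ⟨hynot kv hkv, hys kv (List.mem_cons_of_mem _ hkv)⟩)]
      congr 1
      simp only [pvStepA, pvBodyP, hr, hyi, pvIdx_of_yearSlot hyi, Int.toNat_natCast]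
      rw [pvGetD_set_self _ _ hi]
      simp [PySem.Dict.insert_insert_self, List.set_set, add_assoc]
    · have hmem' : y ∈ t'.map Prod.fst := by
        rcases (by simpa [PySem.Dict.keys] using hmem : y = k ∨ ∃ x, (y, x) ∈ t') with h | ⟨x, hx⟩
        · exact absurd h.symm hk
        · exact List.mem_map_of_mem hx
      have hcont' : (PySem.Dict.mk t').contains y = true := by
        rw [PySem.Dict.contains_iff_mem_keys]; simpa [PySem.Dict.keys] using hmem'
      have hgd : (PySem.Dict.mk ((k, u) :: t')).getD y 0 = (PySem.Dict.mk t').getD y 0 := by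
        simp [PySem.Dict.getD, PySem.Dict.get?_mk_cons, hk]
      have hky : (k == y) = false := by simpa using hk
      simp only [List.map_cons, hky, Bool.false_eq_true, if_false, List.foldl_cons, hgd]
      rw [← PySem.Dict.items_insert_of_contains _ _ hcont']
      rw [ih (pvBodyP s (k, u)) (List.nodup_cons.mp (by simpa using hnd)).2
          (fun kv hkv => hys kv (List.mem_cons_of_mem _ hkv))
          (by simpa [pvBodyP, List.length_set] using hi) hmem']

-- one reverse step: absorbing one more row into the group-by dict commutes with pass 2
lemma pvK (r : List String) (T : PySem.Dict String Int)
    (s : PySem.Dict String Int × List Int)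
    (hnd : T.keys.Nodup)
    (hyrs : ∀ kv ∈ T.items, (yearSlot kv.1).isSome = true)
    (hbnd : ((yearSlot (pvYkey r)).all (fun i => decide (i < s.2.length))) = true) :
    (pvStepT T r).items.foldl pvBodyP s = pvStepA (T.items.foldl pvBodyP s) r := by
  cases h : yearSlot (pvYkey r) with
  | none => simp [pvStepT, pvStepA, h]
  | some i =>
    have hi : i < s.2.length := by
      have := hbnd; rw [h] at this; simpa using this
    simp only [pvStepT, h]
    by_cases hmem : pvYkey r ∈ T.items.map Prod.fst
    · exact pvK2 h r rfl T.items s (by simpa [PySem.Dict.keys] using hnd) hyrs hi hmem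
    · have hcont : T.contains (pvYkey r) = false := by
        rw [← Bool.not_eq_true, PySem.Dict.contains_iff_mem_keys]
        simpa [PySem.Dict.keys] using hmem
      rw [PySem.Dict.items_insert_of_not_contains _ _ hcont,
          PySem.Dict.getD_of_not_contains _ _ hcont, List.foldl_append, List.foldl_cons,
          List.foldl_nil]
      simp [pvStepA, pvBodyP, h, pvIdx_of_yearSlot h, Int.toNat_natCast]

lemma pvTotNodup (rows : List (List String)) (T : PySem.Dict String Int)
    (h : T.keys.Nodup) : (rows.foldl pvStepT T).keys.Nodup := by
  induction rows generalizing T with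
  | nil => exact h
  | cons r rows ih =>
    rw [List.foldl_cons]
    apply ih
    cases hyr : yearSlot (pvYkey r) with
    | none => simpa [pvStepT, hyr] using h
    | some i => simpa [pvStepT, hyr] using PySem.Dict.nodup_keys_insert _ _ _ h

lemma pvTotYears (rows : List (List String)) (T : PySem.Dict String Int)
    (h : ∀ kv ∈ T.items, (yearSlot kv.1).isSome = true) :
    ∀ kv ∈ (rows.foldl pvStepT T).items, (yearSlot kv.1).isSome = true := by
  induction rows generalizing T with
  | nil => exact h
  | cons r rows ih =>
    rw [List.foldl_cons]
    apply ih
    intro kv hkv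
    cases hyr : yearSlot (pvYkey r) with
    | none => exact h kv (by simpa [pvStepT, hyr] using hkv)
    | some i =>
      rw [pvStepT, hyr] at hkv
      rcases (PySem.Dict.mem_items_insert _ _ _ _).mp hkv with hkv | hkv
      · rw [hkv]; simp [hyr]
      · exact h kv hkv.1

-- the main equivalence, over the data rows
lemma pvMain (rows : List (List String)) (d : PySem.Dict String Int) (c : List Int)
    (hb : ∀ row ∈ rows, ((yearSlot (pvYkey row)).all (fun i => decide (i < c.length))) = true) :
    rows.foldl pvStepA (d, c)
      = ((rows.foldl pvStepT PySem.Dict.empty).items).foldl pvBodyP (d, c) := by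
  induction rows using List.reverseRecOn with
  | nil => rfl
  | append_singleton l r ih =>
    rw [List.foldl_append, List.foldl_append, List.foldl_cons, List.foldl_nil,
        List.foldl_cons, List.foldl_nil]
    rw [pvK r (l.foldl pvStepT PySem.Dict.empty) (d, c)
        (pvTotNodup l _ PySem.Dict.nodup_keys_empty)
        (pvTotYears l _ (by intro kv hkv; simp [PySem.Dict.empty] at hkv))
        (hb r (by simp))]
    rw [ih (fun row hrow => hb row (by simp [hrow]))]

-- ===== VERDICT (by name: the statement is the Claim_ definition above) =====
theorem all_victim_spec : Claim_equal_all_victim := by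
  intro data_set count case _ hpre
  unfold Spec_all_victim all_victim all_victim_alt
  rw [PySem.List.foldl_pyRange_pyGetD case [] pvBodyA _ (by norm_num),
      PySem.List.slice_from case (by norm_num : (0:Int) ≤ 1)]
  simp only [Int.toNat_one]
  rw [PySem.List.foldl_congr_mem _ pvBodyA pvStepA _ (fun acc x _ => pvBodyA_eq acc x),
      PySem.List.foldl_congr_mem _ pvBodyT pvStepT _ (fun acc x _ => pvBodyT_eq acc x)]
  rw [pvMain (case.drop 1) (PySem.Dict.mk data_set) count
      (fun row hrow => (hpre row hrow).2.2.2)]
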